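-- pv_equiv track=rewrite | github.com/taihung94/PYTHON | EntryTest/CountingAnagram.py | CountingAnagrams
-- ===== SOURCE A (Python) =====
-- def CountingAnagrams(st):
--
--     arr=st.split()
--     # biến tất cả các từ trong mảng sắp xếp tăng dân, sau đo tìm số lần lặp lại = yêu cầu đề bài
--     arr=[''.join(sorted(w)) for w in arr]
--     count=0
--     dic={}
--     for word in arr:
--         if word in dic:
--             dic[word]+=1
--         else: dic[word]=1
--
--     for value in dic.values():
--         if value >1: count+=1
--     return count
-- ===== SOURCE B (Python) =====
-- def CountingAnagrams(st):
--     count = 0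
--     seen = set()
--     counted = set()
--     for w in st.split():
--         key = ''.join(sorted(w))
--         if key in seen and key not in counted:
--             count += 1
--             counted.add(key)
--         else:
--             seen.add(key)
--     return count
-- ===== Notes on version B (the rewrite author's own statement) =====
-- stated objective: alternative
-- what changed: Replaced the dict-of-frequencies plus a second loop over its values by a single pass that keeps two sets (seen / already-counted) and counts a group exactly at its second occurrence; canonicalization is fused into the same loop.
import Mathlib
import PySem

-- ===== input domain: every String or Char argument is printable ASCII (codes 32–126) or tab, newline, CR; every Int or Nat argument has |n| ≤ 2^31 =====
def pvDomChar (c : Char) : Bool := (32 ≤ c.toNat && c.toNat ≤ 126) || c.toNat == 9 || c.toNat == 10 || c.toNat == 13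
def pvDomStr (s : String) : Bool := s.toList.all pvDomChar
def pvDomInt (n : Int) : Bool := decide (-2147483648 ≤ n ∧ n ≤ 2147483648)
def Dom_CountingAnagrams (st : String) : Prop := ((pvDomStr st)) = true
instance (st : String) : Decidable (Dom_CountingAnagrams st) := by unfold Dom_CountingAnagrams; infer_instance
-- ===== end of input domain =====

-- B replaces A's frequency dict plus second loop over its values by a single pass with two
-- sets (seen / already-counted), counting each group at its second occurrence (alternative
-- decomposition, same cost).

-- ===== PORT A =====
-- ''.join(sorted(w))
def pvCanon (w : String) : String :=
  String.mk (PySem.List.sorted w.toList (fun c => c) false)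

-- the body of A's first loop: if word in dic: dic[word]+=1 else: dic[word]=1
def pvStepA (d : PySem.Dict String Int) (word : String) : PySem.Dict String Int :=
  if d.contains word then d.modify word 0 (· + 1) else d.insert word 1

-- the body of A's second loop: if value > 1: count += 1
def pvStepCnt (count : Int) (v : Int) : Int :=
  if v > 1 then count + 1 else count

def CountingAnagrams (st : String) : Int :=
  let arr := PySem.Str.split₀ st
  let arr := arr.map pvCanon
  let dic := arr.foldl pvStepA PySem.Dict.empty
  dic.values.foldl pvStepCnt 0

-- ===== PORT B =====
-- the body of B's single loop over the two-set state (count, seen, counted)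
def pvStepB (s : Int × PySem.Set String × PySem.Set String) (w : String) :
    Int × PySem.Set String × PySem.Set String :=
  let key := pvCanon w
  if s.2.1.contains key && !(s.2.2.contains key) then
    (s.1 + 1, s.2.1, s.2.2.add key)
  else
    (s.1, s.2.1.add key, s.2.2)

def CountingAnagrams_alt (st : String) : Int :=
  ((PySem.Str.split₀ st).foldl pvStepB (0, PySem.Set.empty, PySem.Set.empty)).1

-- ===== PRECONDITION & SPEC =====
def Spec_CountingAnagrams (st : String) (out : Int) : Prop := out = CountingAnagrams_alt st
instance (st : String) (out : Int) : Decidable (Spec_CountingAnagrams st out) := by unfold Spec_CountingAnagrams; infer_instance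

-- ===== CLAIM (what is proved, stated in full; the proofs are below) =====
def Claim_equal_CountingAnagrams : Prop := ∀ (st : String), Dom_CountingAnagrams st → Spec_CountingAnagrams st (CountingAnagrams st)

-- ===== LEMMAS AND PROOFS =====

-- A's dict-building step is exactly the Counter step.
theorem stepA_eq_counter_step (d : PySem.Dict String Int) (w : String) :
    pvStepA d w = d.modify w 0 (· + 1) := by
  unfold pvStepA
  by_cases h : d.contains w = true
  · simp [h]
  · have h' : d.contains w = false := by simpa using h
    rw [if_neg h]
    simp [PySem.Dict.modify, PySem.Dict.getD_of_not_contains d (0 : Int) h']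

-- A's second loop counts the values > 1.
theorem foldl_count_gt_one (vs : List Int) (a : Int) :
    vs.foldl pvStepCnt a = a + ((vs.filter (fun v => decide (v > 1))).length : Int) := by
  induction vs generalizing a with
  | nil => simp
  | cons v t ih =>
    by_cases h : v > 1 <;> simp [List.foldl_cons, pvStepCnt, ih, h] <;> ring

-- A's body, over an arbitrary word list.
theorem A_core (l : List String) :
    ((l.foldl pvStepA PySem.Dict.empty).values.foldl pvStepCnt 0 : Int)
    = (((PySem.Set.ofList l).filter
        (fun k => decide ((l.count k : Int) > 1))).length : Int) := by
  have hdic : l.foldl pvStepA PySem.Dict.empty = PySem.Dict.counter l := by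
    rw [PySem.Dict.counter_eq_foldl]
    exact PySem.List.foldl_congr_mem l _ _ _ (fun d w _ => stepA_eq_counter_step d w)
  rw [hdic]
  have hvals : (PySem.Dict.counter l).values
      = (PySem.Set.ofList l).map (fun k => ((l.count k : Int))) := by
    show ((PySem.Dict.counter l).items.map (·.2)) = _
    rw [PySem.Dict.items_counter]
    simp
  rw [hvals, foldl_count_gt_one]
  simp [List.filter_map, Function.comp_def]

-- B's loop invariant: over the processed prefix p, `seen` holds the canonical keys of p,
-- `counted` is a nodup list of exactly the keys occurring ≥ 2 times, the counter its length.
theorem B_inv (l p : List String) (c : Int) (seen counted : PySem.Set String)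
    (hseen : ∀ k, k ∈ seen ↔ k ∈ p.map pvCanon)
    (hnd : counted.Nodup)
    (hcnt : ∀ k, k ∈ counted ↔ 2 ≤ ((p.map pvCanon).count k))
    (hc : c = (counted.length : Int)) :
    ∃ counted' : List String, counted'.Nodup ∧
      (∀ k, k ∈ counted' ↔ 2 ≤ (((p ++ l).map pvCanon).count k)) ∧
      (l.foldl pvStepB (c, seen, counted)).1 = (counted'.length : Int) := by
  induction l generalizing p c seen counted with
  | nil =>
    exact ⟨counted, hnd, by simpa using hcnt, by simpa using hc⟩
  | cons w t ih =>
    rw [List.foldl_cons]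
    by_cases hcond : (seen.contains (pvCanon w) && !(counted.contains (pvCanon w))) = true
    · -- second occurrence of this key: count it
      have hmem : pvCanon w ∈ seen ∧ pvCanon w ∉ counted := by
        simp only [Bool.and_eq_true, Bool.not_eq_true', PySem.Set.contains] at hcond
        exact ⟨by simpa using hcond.1, by simpa using hcond.2⟩
      have hp1 : (p.map pvCanon).count (pvCanon w) = 1 := by
        have h1 : 1 ≤ (p.map pvCanon).count (pvCanon w) :=
          List.one_le_count_iff.mpr ((hseen _).mp hmem.1)
        have h2 : ¬ 2 ≤ (p.map pvCanon).count (pvCanon w) := fun h => hmem.2 ((hcnt _).mpr h)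
        omega
      have hstep : pvStepB (c, seen, counted) w = (c + 1, seen, counted ++ [pvCanon w]) := by
        simp only [pvStepB, hcond, if_true]
        have : counted.add (pvCanon w) = counted ++ [pvCanon w] := by
          simp only [PySem.Set.add, PySem.Set.contains, ite_eq_right_iff]
          intro h
          exact absurd (by simpa using h : pvCanon w ∈ counted) hmem.2
        simp [this]
      rw [hstep]
      have := ih (p ++ [w]) (c + 1) seen (counted ++ [pvCanon w])
        (fun k => by
          rw [hseen k]
          simp only [List.map_append, List.map_cons, List.map_nil, List.mem_append,
            List.mem_singleton]
          constructor
          · intro h; exact Or.inl h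
          · rintro (h | h)
            · exact h
            · subst h; exact (hseen _).mp hmem.1)
        (hnd.append (List.nodup_singleton _) (List.disjoint_singleton.mpr hmem.2))
        (fun k => by
          by_cases hk : k = pvCanon w
          · subst hk
            simp [List.count_append, hp1, hmem.2]
          · simp [List.count_append, List.count_singleton, hk, hcnt k, Ne.symm hk])
        (by rw [hc]; push_cast [List.length_append, List.length_singleton]; ring)
      simpa using this
    · -- first occurrence, or already counted
      have hstep : pvStepB (c, seen, counted) w = (c, seen.add (pvCanon w), counted) := by
        simp only [pvStepB]
        rw [if_neg hcond]
      rw [hstep]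
      have hcases : pvCanon w ∉ seen ∨ pvCanon w ∈ counted := by
        simp only [Bool.and_eq_true, Bool.not_eq_true', PySem.Set.contains] at hcond
        by_cases h1 : pvCanon w ∈ seen
        · by_cases h2 : pvCanon w ∈ counted
          · exact Or.inr h2
          · exact absurd ⟨by simpa using h1, by simpa using h2⟩ hcond
        · exact Or.inl h1
      have := ih (p ++ [w]) c (seen.add (pvCanon w)) counted
        (fun k => by
          rw [PySem.Set.mem_add, hseen k]
          simp [or_comm])
        hnd
        (fun k => by
          by_cases hk : k = pvCanon w
          · subst hk
            rcases hcases with h | h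
            · have h0 : (p.map pvCanon).count (pvCanon w) = 0 :=
                List.count_eq_zero.mpr (fun hm => h ((hseen _).mpr hm))
              simp only [List.map_append, List.map_cons, List.map_nil, List.count_append,
                h0, List.count_singleton]
              have : pvCanon w ∉ counted := fun hm => by
                have := (hcnt _).mp hm; omega
              simp [this]
            · have h2 : 2 ≤ (p.map pvCanon).count (pvCanon w) := (hcnt _).mp h
              simp only [List.map_append, List.map_cons, List.map_nil, List.count_append]
              constructor
              · intro _; omega
              · intro _; exact h
          · simp [List.count_append, List.count_singleton, hk, hcnt k, Ne.symm hk])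
        hc
      simpa using this

-- ===== VERDICT (by name: the statement is the Claim_ definition above) =====
theorem CountingAnagrams_spec : Claim_equal_CountingAnagrams := by
  intro st _
  unfold Spec_CountingAnagrams CountingAnagrams CountingAnagrams_alt
  rw [A_core]
  obtain ⟨counted', hnd, hmem, hres⟩ :=
    B_inv (PySem.Str.split₀ st) [] 0 PySem.Set.empty PySem.Set.empty
      (by simp [PySem.Set.empty]) (by simp [PySem.Set.empty]) (by simp [PySem.Set.empty])
      (by simp [PySem.Set.empty])
  simp only [List.nil_append] at hmem
  rw [hres]
  have hperm : ((PySem.Set.ofList ((PySem.Str.split₀ st).map pvCanon)).filter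
      (fun k => decide ((((PySem.Str.split₀ st).map pvCanon).count k : Int) > 1))).Perm counted' := by
    rw [List.perm_ext_iff_of_nodup ((PySem.Set.nodup_ofList _).filter _) hnd]
    intro k
    rw [List.mem_filter, PySem.Set.mem_ofList, hmem k]
    constructor
    · rintro ⟨_, h⟩
      simp only [decide_eq_true_eq] at h
      omega
    · intro h
      refine ⟨List.one_le_count_iff.mp (by omega), ?_⟩
      simp only [decide_eq_true_eq]
      exact_mod_cast h
  exact_mod_cast hperm.length_eq
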